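-- pv_equiv track=rewrite | github.com/KMX-Advent-of-Code/2023-Advent-of-Code | Day12/Jim_Day12.py | first_num_placer
-- ===== SOURCE A (Python) =====
-- def first_num_tester(begin_char_num, chars, nums):
--     """Given a string (chars), and a list of numbers (nums),
--     can a sequence of "#"s starting at begin_char_num solve the first number in nums?
--     (One example for each condition, respectively)
--
--     Ex: begin_char_num=5, chars='.?.?.?.', nums=[1,1]
--         .?.?.?.
--         .....#.
--         False, # could be placed at third ?.  However, this does not leave enough chars to handle the second 1.
--
--     Ex: begin_char_num=0, chars='.?.?.?.', nums=[1,1]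
--         .?.?.?.
--         #.
--         False.  Char 0 is '.'  So, we can't put "#" there.
--
--     Ex: begin_char_num=3, chars='.#.?.?.', nums=[1,1]
--         .#.?.?.
--         ...#.
--         False.  We're solving the first "1".  Placing # at the first ? solves the second "1", not the first.
--
--     Ex: begin_char_num=3, chars='.?.?#.?.', nums=[1,1]
--         .?.?#.?.
--         ...#.
--         False.  Char 3 can be "#", but Char 4 must be "#" not "."
--
--     Ex: begin_char_num=3, chars='.?.#.', [1] (final number)
--         .?.#.
--         .#.
--         False.  Char 2 can be "#".  But, the remaining "#" adds an extra 1 to the schema.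
--     """
--     first_num = nums[0]
--     if len(chars) < sum(nums)+len(nums)-1-begin_char_num: #must be enough chars remaining to handle all remaining nums
--         return False
--     if '.' in chars[begin_char_num:begin_char_num+first_num]: #area for # can have no .
--         return False
--     if '#' in chars[:begin_char_num]: #before first # for first_num, can have no #
--         return False
--     if not begin_char_num+first_num >= len(chars) and chars[begin_char_num+first_num]=='#': #if char after #s, char after #s must not be #
--         return False
--     if len(nums)==1 and '#' in chars[begin_char_num+first_num+1:]: #if final num, all remaining chars must not be #
--         return False
--     return True
--
-- def first_num_placer(prev_char_count, prev_solution_count, chars, nums):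
--     """Given that number n was solved with prev_char_count characters, solve for number n+1.
--     Number n has prev_solution_count solutions of length prev_char_count.  So, each solution
--     we find for number n+1 contributes prev_solution_count total solutions.
--     chars is only remaining chars.  nums is only remaining nums
--
--     Ex.  '.?.?.?.', [1,1]
--     Solve first 1:
--     first_num_placer(0, 1, '.?.?.?.', [1,1])
--         returns: {3:1, 5:1} (The first "1" has 1 solution of length 3 and 1 solution of length 5)
--     Solve second 1:
--     first_num_placer(3, 1, '?.?.', [1])
--         returns: {5:1, 7:1}
--     first_num_placer(5, 1, '?.', [1])
--         returns: {5:1, 7:2} (3 solutions, total)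
--     """
--     first_num_placements = {}
--     for begin_char_num in range(len(chars)-sum(nums)-(len(nums)-1)+1): #total_chars - min_space_for_# - min_space_for_._between_# + 1
--         if first_num_tester(begin_char_num, chars, nums):
--             if prev_char_count+begin_char_num+nums[0]+1 in first_num_placements:
--                 first_num_placements[prev_char_count+begin_char_num+nums[0]+1] += prev_solution_count
--             else:
--                 first_num_placements[prev_char_count+begin_char_num+nums[0]+1] = prev_solution_count
--     return first_num_placements
-- ===== SOURCE B (Python) =====
-- def first_num_placer(prev_char_count, prev_solution_count, chars, nums):
--     # prefix counts of '.' and '#' replace A's per-placement slice scans;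
--     # keys are strictly increasing, so each valid start simply appends one entry.
--     f = nums[0]
--     n = len(chars)
--     dots = [0] * (n + 1)
--     hashes = [0] * (n + 1)
--     for i in range(n):
--         c = chars[i]
--         dots[i + 1] = dots[i] + (1 if c == '.' else 0)
--         hashes[i + 1] = hashes[i] + (1 if c == '#' else 0)
--     last = (len(nums) == 1)
--     res = {}
--     for b in range(n - sum(nums) - len(nums) + 2):
--         e = b + f
--         if (dots[e] == dots[b]
--                 and hashes[b] == 0
--                 and (e >= n or chars[e] != '#')
--                 and (not last or hashes[n] == hashes[min(e + 1, n)])):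
--             res[prev_char_count + b + f + 1] = prev_solution_count
--     return res
-- ===== Notes on version B (the rewrite author's own statement) =====
-- stated objective: alternative
-- what changed: B precomputes prefix counts of '.' and '#' once and tests each candidate placement against them arithmetically instead of rescanning slices, and drops A's never-firing length check and dict-increment branch (keys are strictly increasing).
-- outside the precondition, e.g. on first_num_placer(0, 1, '..?..', [-3]): A returns {1: 1, 2: 1, 3: 1, 4: 1, 5: 1, 6: 1}, B raises IndexError; on first_num_placer(0, 1, '.', []): A raises IndexError, B raises IndexError
import Mathlib
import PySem

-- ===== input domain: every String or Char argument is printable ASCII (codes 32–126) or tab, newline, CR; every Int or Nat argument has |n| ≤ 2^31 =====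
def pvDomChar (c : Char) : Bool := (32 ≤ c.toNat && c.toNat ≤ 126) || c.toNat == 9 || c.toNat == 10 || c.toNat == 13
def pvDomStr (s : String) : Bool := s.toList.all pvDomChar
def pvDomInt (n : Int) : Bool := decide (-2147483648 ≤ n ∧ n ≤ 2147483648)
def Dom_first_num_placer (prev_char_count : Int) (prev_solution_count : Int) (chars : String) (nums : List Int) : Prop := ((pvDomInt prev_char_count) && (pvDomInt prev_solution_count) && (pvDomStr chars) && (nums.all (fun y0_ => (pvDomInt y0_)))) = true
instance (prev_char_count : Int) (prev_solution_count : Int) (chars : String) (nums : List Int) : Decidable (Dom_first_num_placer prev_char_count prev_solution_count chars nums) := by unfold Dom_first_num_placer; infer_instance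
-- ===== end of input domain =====

-- ===== PORT A =====
-- B tests each candidate placement against precomputed prefix counts of '.'/'#' instead of
-- rescanning slices; both folds walk the same candidate range; Pre_ restricts to the
-- puzzle's natural domain (see the sentence above Pre_).
-- Transliteration of first_num_tester; string ops work on chars.toList (PySem.Chars side).
-- nums[0] / chars[i] are pyGetD/pyGet?: in range on every input Pre_ admits.
def first_num_tester (begin_char_num : Int) (cs : List Char) (nums : List Int) : Bool :=
  let first_num := PySem.List.pyGetD nums 0 0
  if (cs.length : Int) < nums.sum + (nums.length : Int) - 1 - begin_char_num then false
  else if (PySem.List.slice cs (some begin_char_num) (some (begin_char_num + first_num))).contains '.' then false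
  else if (PySem.List.slice cs none (some begin_char_num)).contains '#' then false
  else if !(decide (begin_char_num + first_num ≥ (cs.length : Int))) && (PySem.List.pyGet? cs (begin_char_num + first_num) == some '#') then false
  else if (nums.length == 1) && (PySem.List.slice cs (some (begin_char_num + first_num + 1)) none).contains '#' then false
  else true

def first_num_placer (prev_char_count : Int) (prev_solution_count : Int) (chars : String) (nums : List Int) : List (Int × Int) :=
  let cs := chars.toList
  ((PySem.List.pyRange 0 ((cs.length : Int) - nums.sum - ((nums.length : Int) - 1) + 1) 1).foldl
    (fun (d : PySem.Dict Int Int) begin_char_num =>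
      if first_num_tester begin_char_num cs nums then
        let key := prev_char_count + begin_char_num + PySem.List.pyGetD nums 0 0 + 1
        if d.contains key then d.modify key 0 (· + prev_solution_count)
        else d.insert key prev_solution_count
      else d)
    PySem.Dict.empty).items

-- ===== PORT B =====
-- running prefix-count list of Source B's `dots.append(dots[-1] + …)` loop (one list per target char)
def buildPrefix (t : Char) (v : Int) : List Char → List Int
  | [] => []
  | c :: rest => let v' := v + (if c = t then 1 else 0); v' :: buildPrefix t v' rest

def first_num_placer_alt (prev_char_count : Int) (prev_solution_count : Int) (chars : String) (nums : List Int) : List (Int × Int) :=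
  let cs := chars.toList
  let n : Int := cs.length
  let f := PySem.List.pyGetD nums 0 0
  let dots := 0 :: buildPrefix '.' 0 cs
  let hashes := 0 :: buildPrefix '#' 0 cs
  let last := nums.length == 1
  ((PySem.List.pyRange 0 (n - nums.sum - (nums.length : Int) + 2) 1).foldl
    (fun (d : PySem.Dict Int Int) b =>
      let e := b + f
      if (PySem.List.pyGetD dots e 0 == PySem.List.pyGetD dots b 0)
          && (PySem.List.pyGetD hashes b 0 == 0)
          && (decide (e ≥ n) || !(PySem.List.pyGet? cs e == some '#'))
          && (!last || (PySem.List.pyGetD hashes n 0 == PySem.List.pyGetD hashes (min (e + 1) n) 0))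
      then d.insert (prev_char_count + b + f + 1) prev_solution_count
      else d)
    PySem.Dict.empty).items

-- ===== PRECONDITION & SPEC =====
-- Pre_ narrows to the puzzle's natural domain: nums must be non-empty (A raises IndexError on
-- nums = []) and, unless the candidate range is empty (then both trivially return {}), its
-- entries non-negative — on negative group lengths A only returns via Python's
-- negative-index/slice wraparound, an artifact outside the function's purpose.
def Pre_first_num_placer (prev_char_count : Int) (prev_solution_count : Int) (chars : String) (nums : List Int) : Prop :=
  nums ≠ [] ∧ ((∀ x ∈ nums, 0 ≤ x) ∨ (chars.toList.length : Int) - nums.sum - (nums.length : Int) + 2 ≤ 0)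
instance (prev_char_count : Int) (prev_solution_count : Int) (chars : String) (nums : List Int) : Decidable (Pre_first_num_placer prev_char_count prev_solution_count chars nums) := by unfold Pre_first_num_placer; infer_instance

def pvWitness_first_num_placer : Int × Int × String × List Int := (0, 1, ".?.?.?.", [1, 1])

def Spec_first_num_placer (prev_char_count : Int) (prev_solution_count : Int) (chars : String) (nums : List Int) (out : List (Int × Int)) : Prop := out = first_num_placer_alt prev_char_count prev_solution_count chars nums
instance (prev_char_count : Int) (prev_solution_count : Int) (chars : String) (nums : List Int) (out : List (Int × Int)) : Decidable (Spec_first_num_placer prev_char_count prev_solution_count chars nums out) := by unfold Spec_first_num_placer; infer_instance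

-- ===== CLAIM (what is proved, stated in full; the proofs are below) =====
def Claim_equal_first_num_placer : Prop := ∀ (prev_char_count : Int) (prev_solution_count : Int) (chars : String) (nums : List Int), Dom_first_num_placer prev_char_count prev_solution_count chars nums → Pre_first_num_placer prev_char_count prev_solution_count chars nums → Spec_first_num_placer prev_char_count prev_solution_count chars nums (first_num_placer prev_char_count prev_solution_count chars nums)

-- ===== LEMMAS AND PROOFS =====

-- lookup into the prefix-count list: entry i is the count of t among the first i characters
lemma buildPrefix_getD (t : Char) : ∀ (cs : List Char) (v : Int) (i : Nat), i ≤ cs.length →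
    (v :: buildPrefix t v cs).getD i 0 = v + (((cs.take i).countP (· == t) : Nat) : Int) := by
  intro cs
  induction cs with
  | nil => intro v i h; simp at h; subst h; simp
  | cons c rest ih =>
    intro v i h
    cases i with
    | zero => simp
    | succ i =>
      simp only [buildPrefix, List.getD_cons_succ]
      have := ih (v + (if c = t then 1 else 0)) i (by simpa using h)
      simp only [List.take_succ_cons, List.countP_cons] at *
      rw [this]
      by_cases hc : c = t
      · simp [hc]; ring
      · simp [hc, (by simpa using hc : ¬ (c == t) = true)]

lemma lookup_prefix (t : Char) (cs : List Char) (j : Int) (h0 : 0 ≤ j) (hn : j ≤ (cs.length : Int)) :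
    PySem.List.pyGetD ((0 : Int) :: buildPrefix t 0 cs) j 0 = (((cs.take j.toNat).countP (· == t) : Nat) : Int) := by
  rw [PySem.List.pyGetD_of_nonneg _ _ h0]
  have := buildPrefix_getD t cs 0 j.toNat (by omega)
  simpa using this

-- a Bool membership test is "the count is non-zero"
lemma contains_eq_countP (l : List Char) (t : Char) :
    l.contains t = !((((l.countP (· == t) : Nat) : Int)) == 0) := by
  rw [List.contains_eq_mem]
  by_cases h : t ∈ l
  · have : l.countP (· == t) ≠ 0 := by
      rw [← List.count, Ne, List.count_eq_zero]; exact fun hh => hh h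
    simp only [h, decide_true]
    have h2 : ((l.countP (· == t) : Nat) : Int) ≠ 0 := by exact_mod_cast this
    simpa [beq_iff_eq, h2] using h
  · have : l.countP (· == t) = 0 := by rw [← List.count, List.count_eq_zero]; exact h
    simp [h, this]

-- the per-candidate test of A equals the O(1) prefix-count test of B
lemma tester_eq (cs : List Char) (nums : List Int)
    (hne : nums ≠ []) (hnn : ∀ x ∈ nums, 0 ≤ x)
    (b : Int) (hb0 : 0 ≤ b) (hbL : b < (cs.length : Int) - nums.sum - (nums.length : Int) + 2) :
    first_num_tester b cs nums =
      (let n : Int := cs.length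
       let f := PySem.List.pyGetD nums 0 0
       let dots := (0 : Int) :: buildPrefix '.' 0 cs
       let hashes := (0 : Int) :: buildPrefix '#' 0 cs
       let last := nums.length == 1
       let e := b + f
       (PySem.List.pyGetD dots e 0 == PySem.List.pyGetD dots b 0)
          && (PySem.List.pyGetD hashes b 0 == 0)
          && (decide (e ≥ n) || !(PySem.List.pyGet? cs e == some '#'))
          && (!last || (PySem.List.pyGetD hashes n 0 == PySem.List.pyGetD hashes (min (e + 1) n) 0))) := by
  simp only []
  set f := PySem.List.pyGetD nums 0 0 with hfdef
  have hf0 : 0 ≤ f := by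
    obtain ⟨m, t, rfl⟩ : ∃ m t, nums = m :: t := by
      cases nums with | nil => exact absurd rfl hne | cons m t => exact ⟨m, t, rfl⟩
    rw [hfdef, PySem.List.pyGetD_zero_cons]
    exact hnn _ (by simp)
  have hfs : f ≤ nums.sum := by
    obtain ⟨m, t, rfl⟩ : ∃ m t, nums = m :: t := by
      cases nums with | nil => exact absurd rfl hne | cons m t => exact ⟨m, t, rfl⟩
    rw [hfdef, PySem.List.pyGetD_zero_cons]
    have : 0 ≤ t.sum := List.sum_nonneg (fun x hx => hnn x (by simp [hx]))
    simp [List.sum_cons]; omega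
  have hk : 1 ≤ (nums.length : Int) := by
    cases nums with | nil => exact absurd rfl hne | cons m t => simp
  have he_n : b + f ≤ (cs.length : Int) := by omega
  have hbe : b ≤ b + f := by omega
  rw [lookup_prefix '.' cs (b+f) (by omega) he_n,
      lookup_prefix '.' cs b hb0 (by omega),
      lookup_prefix '#' cs b hb0 (by omega),
      lookup_prefix '#' cs (cs.length : Int) (by omega) (by omega),
      lookup_prefix '#' cs (min (b+f+1) (cs.length : Int)) (by omega) (by omega)]
  simp only [first_num_tester]
  rw [if_neg (by omega)]
  rw [PySem.List.slice_toNat cs hb0 (by omega),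
      PySem.List.slice_to cs hb0,
      PySem.List.slice_from cs (by omega : (0:Int) ≤ b + f + 1)]
  rw [contains_eq_countP, contains_eq_countP, contains_eq_countP]
  simp only [← hfdef, Int.toNat_natCast, List.take_length]
  have hmin_eq : List.take (min (b + f + 1) (cs.length:Int)).toNat cs = List.take (b + f + 1).toNat cs := by
    rcases le_total (b+f+1) (cs.length:Int) with h | h
    · rw [min_eq_left h]
    · rw [min_eq_right h, Int.toNat_natCast, List.take_length,
        List.take_of_length_le (by omega)]
  rw [hmin_eq]
  have hWsplit : List.countP (· == '.') (List.take (b+f).toNat cs) =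
      List.countP (· == '.') (List.take b.toNat cs) +
      List.countP (· == '.') (List.take ((b+f).toNat - b.toNat) (List.drop b.toNat cs)) := by
    conv_lhs => rw [show (b+f).toNat = b.toNat + ((b+f).toNat - b.toNat) by omega, List.take_add]
    rw [List.countP_append]
  have hHsplit : List.countP (· == '#') cs =
      List.countP (· == '#') (List.take (b+f+1).toNat cs) +
      List.countP (· == '#') (List.drop (b+f+1).toNat cs) := by
    conv_lhs => rw [← List.take_append_drop ((b+f+1).toNat) cs]
    rw [List.countP_append]
  split_ifs with h1 h2 h3 h4
  · symm
    have hW : List.countP (· == '.') (List.take ((b+f).toNat - b.toNat) (List.drop b.toNat cs)) ≠ 0 := by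
      simpa using h1
    have : ((List.countP (· == '.') (List.take (b+f).toNat cs) : Nat) : Int) ≠
        ((List.countP (· == '.') (List.take b.toNat cs) : Nat) : Int) := by
      omega
    simp [this]
  · symm
    have h2' : (((List.countP (· == '#') (List.take b.toNat cs) : Nat) : Int) == 0) = false := by
      simpa using h2
    rw [h2']
    simp
  · symm
    obtain ⟨h3a, h3b⟩ := (Bool.and_eq_true _ _).mp h3
    have hd : (decide (b + f ≥ (cs.length:Int))) = false := by simpa using h3a
    rw [hd, h3b]
    simp
  · symm
    obtain ⟨h4a, h4b⟩ := (Bool.and_eq_true _ _).mp h4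
    replace h4 : nums.length = 1 ∧ ¬ ((List.countP (· == '#') (List.drop (b+f+1).toNat cs) : Nat) : Int) = 0 :=
      ⟨by simpa using h4a, by simpa using h4b⟩
    have hS : List.countP (· == '#') (List.drop (b+f+1).toNat cs) ≠ 0 := by
      intro h0
      rw [h0] at h4
      simp at h4
    have : ((List.countP (· == '#') cs : Nat) : Int) ≠
        ((List.countP (· == '#') (List.take (b+f+1).toNat cs) : Nat) : Int) := by omega
    simp [h4.1, this]
  · symm
    simp only [Bool.not_eq_true] at h1 h2 h4
    have hW : List.countP (· == '.') (List.take ((b+f).toNat - b.toNat) (List.drop b.toNat cs)) = 0 :=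
      List.countP_eq_zero.mpr (by have := h1; simp at this; simpa using this)
    have hHB : List.countP (· == '#') (List.take b.toNat cs) = 0 :=
      List.countP_eq_zero.mpr (by have := h2; simp at this; simpa using this)
    have c1 : ((List.countP (· == '.') (List.take (b+f).toNat cs) : Nat) : Int) =
        ((List.countP (· == '.') (List.take b.toNat cs) : Nat) : Int) := by omega
    have c3 : (decide (b + f ≥ (cs.length:Int)) || !(PySem.List.pyGet? cs (b + f) == some '#')) = true := by
      rcases Bool.eq_false_or_eq_true (decide (b + f ≥ (cs.length:Int))) with hd | hd
      · rw [hd]; rfl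
      · have hd' : b + f < (cs.length:Int) := by simpa using hd
        have h3' : ¬ PySem.List.pyGet? cs (b + f) = some '#' := by
          intro hp
          exact h3 (by simp [hp, show ¬ (b + f ≥ (cs.length:Int)) by omega])
        simp [hd, h3']
    have c4 : (!(nums.length == 1) ||
        (((List.countP (· == '#') cs : Nat) : Int) ==
         ((List.countP (· == '#') (List.take (b+f+1).toNat cs) : Nat) : Int))) = true := by
      by_cases hl : nums.length = 1
      · have hS : List.countP (· == '#') (List.drop (b+f+1).toNat cs) = 0 := by
          rcases Bool.and_eq_false_iff.mp h4 with hh | hh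
          · simp [hl] at hh
          · simpa using hh
        have : ((List.countP (· == '#') cs : Nat) : Int) =
            ((List.countP (· == '#') (List.take (b+f+1).toNat cs) : Nat) : Int) := by omega
        simp [this]
      · simp [hl]
    rw [c3, c4]
    simp [c1, hHB]

-- both folds agree: the keys are strictly increasing, so A's `+=` branch never fires
lemma fold_insert_eq (ps : Int) (key : Int → Int) (tA tB : Int → Bool)
    (hmono : ∀ a b : Int, a < b → key a < key b) :
    ∀ (bs : List Int) (d : PySem.Dict Int Int),
    (∀ b ∈ bs, tA b = tB b) →
    (∀ b ∈ bs, ∀ k ∈ d.keys, k < key b) →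
    bs.Pairwise (· < ·) →
    bs.foldl (fun d b => if tA b then (if d.contains (key b) then d.modify (key b) 0 (· + ps) else d.insert (key b) ps) else d) d
      = bs.foldl (fun d b => if tB b then d.insert (key b) ps else d) d := by
  intro bs
  induction bs with
  | nil => intro d _ _ _; rfl
  | cons b rest ih =>
    intro d hT hK hP
    have hPrest := hP.of_cons
    have hblt : ∀ b' ∈ rest, b < b' := by
      intro b' hb'; exact (List.pairwise_cons.mp hP).1 b' hb'
    simp only [List.foldl_cons]
    rw [hT b (by simp)]
    cases htb : tB b with
    | false =>
      simp only [Bool.false_eq_true, if_false]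
      exact ih d (fun x hx => hT x (by simp [hx])) (fun x hx => hK x (by simp [hx])) hPrest
    | true =>
      simp only [if_true]
      have hcont : d.contains (key b) = false := by
        rw [← Bool.not_eq_true, PySem.Dict.contains_iff_mem_keys]
        intro hmem
        exact absurd rfl (ne_of_lt (hK b (by simp) _ hmem)).symm.elim
      rw [hcont]
      simp only [Bool.false_eq_true, if_false]
      apply ih
      · intro x hx; exact hT x (by simp [hx])
      · intro x hx k hk
        rw [PySem.Dict.keys_insert_of_not_contains d ps hcont] at hk
        rcases List.mem_append.mp hk with h1 | h1
        · exact lt_trans (hK b (by simp) _ h1) (hmono _ _ (hblt x hx))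
        · simp at h1; subst h1; exact hmono _ _ (hblt x hx)
      · exact hPrest

-- ===== VERDICT (by name: the statement is the Claim_ definition above) =====
theorem first_num_placer_spec : Claim_equal_first_num_placer := by
  intro prev_char_count prev_solution_count chars nums _ hpre
  obtain ⟨hne, hrest⟩ := hpre
  unfold Spec_first_num_placer first_num_placer first_num_placer_alt
  dsimp only
  rw [show ((chars.toList.length : Int) - nums.sum - ((nums.length : Int) - 1) + 1)
      = ((chars.toList.length : Int) - nums.sum - (nums.length : Int) + 2) from by ring]
  rcases hrest with hnn | hempty
  · exact congrArg PySem.Dict.items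
      (fold_insert_eq prev_solution_count
        (fun b => prev_char_count + b + PySem.List.pyGetD nums 0 0 + 1)
        (fun b => first_num_tester b chars.toList nums)
        _
        (fun a b h => by dsimp only; omega)
        _ PySem.Dict.empty
        (fun b hb => tester_eq chars.toList nums hne hnn b
          (PySem.List.mem_pyRange_one.mp hb).1 (PySem.List.mem_pyRange_one.mp hb).2)
        (fun b hb k hk => by rw [PySem.Dict.keys_empty] at hk; simp at hk)
        (PySem.List.pairwise_lt_pyRange_one 0 _))
  · rw [PySem.List.pyRange_one_eq_nil (by omega)]
    rfl
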